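-- pv_equiv track=rewrite | github.com/elas123/home-assistant-config | pyscript/test_dashboard_integration.py | _aggregate_learning_status
-- ===== SOURCE A (Python) =====
-- def _aggregate_learning_status(room_data):
--     """Aggregate learning status from multiple rooms."""
--     statuses = [data['learning_status'] for data in room_data.values()]
--
--     if 'error' in statuses:
--         return 'error'
--     elif all(s == 'active' for s in statuses):
--         return 'active'
--     elif all(s == 'inactive' for s in statuses):
--         return 'inactive'
--     elif all(s == 'paused' for s in statuses):
--         return 'paused'
--     else:
--         return 'partial'
-- ===== SOURCE B (Python) =====
-- def _aggregate_learning_status(room_data):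
--     """Aggregate learning status from multiple rooms."""
--     acc = None
--     for data in room_data.values():
--         s = data['learning_status']
--         if acc is None:
--             acc = s
--         elif acc == 'error' or s == 'error':
--             acc = 'error'
--         elif acc != s:
--             acc = 'partial'
--     if acc is None:
--         return 'active'
--     if acc in ('error', 'active', 'inactive', 'paused'):
--         return acc
--     return 'partial'
-- ===== Notes on version B (the rewrite author's own statement) =====
-- stated objective: alternative
-- what changed: B replaces A's four separate full-list all() scans with a single pass that folds the statuses through a commutative merge accumulator (error-absorbing, equal-keeps, unequal-collapses-to-partial) and maps the final accumulator to the summary status.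
import Mathlib
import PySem

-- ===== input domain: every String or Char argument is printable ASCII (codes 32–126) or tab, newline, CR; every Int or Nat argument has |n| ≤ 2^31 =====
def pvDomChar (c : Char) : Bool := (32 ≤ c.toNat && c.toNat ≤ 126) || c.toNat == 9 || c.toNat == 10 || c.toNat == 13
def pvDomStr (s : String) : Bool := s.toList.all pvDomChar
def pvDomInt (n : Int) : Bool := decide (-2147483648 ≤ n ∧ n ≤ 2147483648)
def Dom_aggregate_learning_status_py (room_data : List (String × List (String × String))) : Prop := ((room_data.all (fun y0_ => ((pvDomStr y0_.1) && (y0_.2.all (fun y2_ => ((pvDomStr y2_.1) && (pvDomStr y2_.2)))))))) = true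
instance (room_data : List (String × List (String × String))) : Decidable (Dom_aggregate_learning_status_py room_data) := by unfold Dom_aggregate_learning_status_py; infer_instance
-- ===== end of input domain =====

-- B replaces A's four full-list all() scans with one single-pass merge accumulator (alternative decomposition; return value only).


-- ===== PORT A =====
-- statuses = [data['learning_status'] for data in room_data.values()]; under Pre_ the lookup
-- never misses, so the .getD "" default is never used (exact where Pre_ holds).
def aggregate_learning_status_py (room_data : List (String × List (String × String))) : String :=
  let statuses : List String :=
    ((PySem.Dict.ofList room_data).values).map
      (fun data => ((PySem.Dict.ofList data).get? "learning_status").getD "")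
  if statuses.contains "error" then "error"
  else if statuses.all (fun s => s == "active") then "active"
  else if statuses.all (fun s => s == "inactive") then "inactive"
  else if statuses.all (fun s => s == "paused") then "paused"
  else "partial"

-- ===== PORT B =====
-- the loop body: acc is None → s; 'error' absorbs; unequal statuses collapse to 'partial'
def pvMerge (acc : Option String) (s : String) : Option String :=
  match acc with
  | none => some s
  | some a => if a = "error" ∨ s = "error" then some "error"
              else if a ≠ s then some "partial" else acc

def aggregate_learning_status_py_alt (room_data : List (String × List (String × String))) : String :=
  let acc : Option String :=
    ((PySem.Dict.ofList room_data).values).foldl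
      (fun acc data => pvMerge acc (((PySem.Dict.ofList data).get? "learning_status").getD "")) none
  match acc with
  | none => "active"
  | some a => if ["error", "active", "inactive", "paused"].contains a then a else "partial"

-- ===== PRECONDITION & SPEC =====
-- Pre_ excludes exactly the inputs on which A raises KeyError: some effective room dict lacks 'learning_status'.
def Pre_aggregate_learning_status_py (room_data : List (String × List (String × String))) : Prop :=
  ∀ data ∈ (PySem.Dict.ofList room_data).values,
    (PySem.Dict.ofList data).contains "learning_status" = true
instance (room_data : List (String × List (String × String))) : Decidable (Pre_aggregate_learning_status_py room_data) := by unfold Pre_aggregate_learning_status_py; infer_instance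

def pvWitness_aggregate_learning_status_py : (List (String × List (String × String))) :=
  [("kitchen", [("learning_status", "active")]), ("bedroom", [("learning_status", "error")])]

def Spec_aggregate_learning_status_py (room_data : List (String × List (String × String))) (out : String) : Prop := out = aggregate_learning_status_py_alt room_data
instance (room_data : List (String × List (String × String))) (out : String) : Decidable (Spec_aggregate_learning_status_py room_data out) := by unfold Spec_aggregate_learning_status_py; infer_instance

-- ===== CLAIM (what is proved, stated in full; the proofs are below) =====
def Claim_equal_aggregate_learning_status_py : Prop := ∀ (room_data : List (String × List (String × String))), Dom_aggregate_learning_status_py room_data → Pre_aggregate_learning_status_py room_data → Spec_aggregate_learning_status_py room_data (aggregate_learning_status_py room_data)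

-- ===== LEMMAS AND PROOFS =====

-- closed form of B's fold once the accumulator is non-None
set_option maxRecDepth 8192 in
lemma fold_merge (xs : List String) (a : String) :
    xs.foldl pvMerge (some a) =
      some (if a = "error" ∨ xs.contains "error" then "error"
            else if xs.all (fun s => s == a) then a else "partial") := by
  induction xs generalizing a with
  | nil => simp
  | cons h t ih =>
    simp only [List.foldl_cons, pvMerge]
    by_cases ha : a = "error" <;> by_cases hh : h = "error" <;> by_cases hah : a = h <;>
      by_cases ht : "error" ∈ t <;> simp_all [ih] <;> simp_all [Ne.symm hh] <;>
      simp_all [Ne.symm hah]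

-- A's if-chain equals B's fold-then-map on the same status list
lemma chain_eq_fold (xs : List String) :
    (if xs.contains "error" then "error"
     else if xs.all (fun s => s == "active") then "active"
     else if xs.all (fun s => s == "inactive") then "inactive"
     else if xs.all (fun s => s == "paused") then "paused"
     else "partial")
    = (match xs.foldl pvMerge none with
       | none => "active"
       | some a => if ["error", "active", "inactive", "paused"].contains a then a else "partial") := by
  cases xs with
  | nil => simp
  | cons h t =>
    have hstep : (h :: t).foldl pvMerge none = t.foldl pvMerge (some h) := rfl
    rw [hstep, fold_merge]
    by_cases hh : h = "error"
    · subst hh; simp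
    · by_cases ht : "error" ∈ t
      · simp [hh, ht, Ne.symm hh]
      · by_cases hall : ∀ x ∈ t, x = h
        · by_cases h1 : h = "active" <;> by_cases h2 : h = "inactive" <;> by_cases h3 : h = "paused" <;>
            simp_all [Ne.symm hh] <;>
            (rw [if_pos hall]; rintro (rfl | rfl | rfl | rfl) _ <;> simp_all)
        · have h1 : ¬(h = "active" ∧ ∀ x ∈ t, x = "active") := by rintro ⟨rfl, hc⟩; exact hall hc
          have h2 : ¬(h = "inactive" ∧ ∀ x ∈ t, x = "inactive") := by rintro ⟨rfl, hc⟩; exact hall hc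
          have h3 : ¬(h = "paused" ∧ ∀ x ∈ t, x = "paused") := by rintro ⟨rfl, hc⟩; exact hall hc
          simp [hh, ht, hall, Ne.symm hh, h1, h2, h3]

-- ===== VERDICT (by name: the statement is the Claim_ definition above) =====
theorem aggregate_learning_status_py_spec : Claim_equal_aggregate_learning_status_py := by
  intro room_data _ _
  unfold Spec_aggregate_learning_status_py aggregate_learning_status_py aggregate_learning_status_py_alt
  rw [← List.foldl_map]
  exact chain_eq_fold _
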